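-- pv_equiv track=rewrite | github.com/jokoshima/fubini-rankings | fubeanie.py | is_fr
-- ===== SOURCE A (Python) =====
-- def is_fr(fr):
--     ranks = sorted(list(set(fr)))
--     count = [fr.count(i) for i in ranks]
--     if ranks[0] != 1:
--         return False
--     pos = 1
--     for i in range(len(ranks)):
--         if pos != ranks[i]:
--             return False
--         pos += count[i]
--     return True
-- ===== SOURCE B (Python) =====
-- def is_fr(fr):
--     s = sorted(fr)
--     if s[0] != 1:
--         return False
--     for i in range(len(s)):
--         if i > 0 and s[i] == s[i - 1]:
--             continue  # repeated rank: already validated at its first occurrence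
--         if s[i] != i + 1:
--             return False
--     return True
-- ===== Notes on version B (the rewrite author's own statement) =====
-- stated objective: simpler
-- what changed: B sorts the full list once and checks each first occurrence of a value against its 0-based index (index = number of smaller elements), instead of A's set+sorted-distinct-ranks plus a per-rank fr.count histogram and an accumulated position variable; no count table is built and fr is scanned once after sorting instead of once per distinct rank.
import Mathlib
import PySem

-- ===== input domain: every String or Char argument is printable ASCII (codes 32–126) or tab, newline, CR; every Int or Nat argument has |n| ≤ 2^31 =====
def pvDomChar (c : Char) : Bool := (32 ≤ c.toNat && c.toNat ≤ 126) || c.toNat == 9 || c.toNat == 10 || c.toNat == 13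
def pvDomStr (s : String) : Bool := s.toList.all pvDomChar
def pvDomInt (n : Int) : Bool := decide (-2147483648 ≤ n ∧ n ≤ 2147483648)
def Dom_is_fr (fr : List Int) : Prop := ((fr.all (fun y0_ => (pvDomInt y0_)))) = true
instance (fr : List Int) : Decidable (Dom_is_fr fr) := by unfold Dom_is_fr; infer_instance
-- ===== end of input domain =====

-- B replaces A's set + per-rank count histogram + accumulated position with one full sort and an
-- index check at each first occurrence (objective: simpler; no count table is maintained).

-- ===== PORT A =====
-- the 'for i in range(len(ranks))' loop with early return, over ranks zipped with count
def isFrLoopA : List (Int × Int) → Int → Bool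
  | [], _ => true
  | (r, c) :: rest, pos => if pos ≠ r then false else isFrLoopA rest (pos + c)

def is_fr (fr : List Int) : Bool :=
  let ranks := PySem.List.sorted (PySem.Set.ofList fr) (fun x => x) false
  let count := ranks.map (fun i => (PySem.List.count fr i : Int))
  if PySem.List.pyGetD ranks 0 0 ≠ 1 then false
  else isFrLoopA (ranks.zip count) 1

-- ===== PORT B =====
-- the 'for i in range(len(s))' loop with early return; prev = s[i-1] (none when i = 0)
def isFrLoopB : List Int → Option Int → Int → Bool
  | [], _, _ => true
  | x :: rest, prev, i =>
    if prev == some x then isFrLoopB rest (some x) (i + 1)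
    else if x ≠ i + 1 then false
    else isFrLoopB rest (some x) (i + 1)

def is_fr_alt (fr : List Int) : Bool :=
  let s := PySem.List.sorted fr (fun x => x) false
  if PySem.List.pyGetD s 0 0 ≠ 1 then false
  else isFrLoopB s none 0

-- ===== PRECONDITION & SPEC =====
-- A raises IndexError on the empty list (ranks[0]); B raises there too (s[0]); Pre_ excludes exactly that.
def Pre_is_fr (fr : List Int) : Prop := fr ≠ []
instance (fr : List Int) : Decidable (Pre_is_fr fr) := by unfold Pre_is_fr; infer_instance
def pvWitness_is_fr : List Int := ([1, 1, 3])

def Spec_is_fr (fr : List Int) (out : Bool) : Prop := out = is_fr_alt fr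
instance (fr : List Int) (out : Bool) : Decidable (Spec_is_fr fr out) := by unfold Spec_is_fr; infer_instance

-- ===== CLAIM (what is proved, stated in full; the proofs are below) =====
def Claim_equal_is_fr : Prop := ∀ (fr : List Int), Dom_is_fr fr → Pre_is_fr fr → Spec_is_fr fr (is_fr fr)

-- ===== LEMMAS AND PROOFS =====

theorem ofList_nodup (xs : List Int) : (PySem.Set.ofList xs : List Int).Nodup := by
  have := PySem.List.nodup_dedup xs
  simpa [PySem.List.dedup_eq_ofList] using this

theorem mem_ofList (xs : List Int) (x : Int) : x ∈ (PySem.Set.ofList xs : List Int) ↔ x ∈ xs := by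
  have := PySem.List.mem_dedup xs x
  simpa [PySem.List.dedup_eq_ofList] using this

-- B's loop skips a run of repeated ranks in one block
theorem isFrLoopB_replicate (m : Nat) (x : Int) (u : List Int) (j : Int) :
    isFrLoopB (List.replicate m x ++ u) (some x) j = isFrLoopB u (some x) (j + m) := by
  induction m generalizing j with
  | zero => simp
  | succ k ih =>
      simp only [List.replicate_succ, List.cons_append, isFrLoopB, beq_self_eq_true]
      rw [if_pos (by simp), ih (j + 1)]
      congr 1
      push_cast; ring

-- a ≤-sorted nonempty list is its head's run followed by strictly larger elements
theorem sorted_cons_decomp (x : Int) (rest : List Int)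
    (hsorted : (x :: rest).Pairwise (· ≤ ·)) :
    ∃ (m : Nat) (u : List Int), List.replicate m x ++ u = rest ∧ (∀ y ∈ u, x < y)
      ∧ u.Pairwise (· ≤ ·) := by
  have hxrest : ∀ y ∈ rest, x ≤ y := (List.pairwise_cons.mp hsorted).1
  have hrest : rest.Pairwise (· ≤ ·) := (List.pairwise_cons.mp hsorted).2
  refine ⟨(rest.takeWhile (fun y => y == x)).length, rest.dropWhile (fun y => y == x), ?_, ?_, ?_⟩
  · rw [← List.eq_replicate_of_mem (l := rest.takeWhile (fun y => y == x))
      (fun b hb => by have := List.mem_takeWhile_imp hb; simpa using this)]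
    exact List.takeWhile_append_dropWhile
  · have hu_sorted : (rest.dropWhile (fun y => y == x)).Pairwise (· ≤ ·) :=
      List.Pairwise.sublist (List.dropWhile_sublist _) hrest
    cases hdw : rest.dropWhile (fun y => y == x) with
    | nil => intro y hy; simp at hy
    | cons h w =>
        have hh : (h == x) = false := by
          have h2 := List.head?_dropWhile_not (fun y => y == x) rest
          rw [hdw] at h2
          simpa using h2
        have hhx : h ≠ x := by simpa using hh
        have hxh : x < h := by
          have : x ≤ h := hxrest h ((List.dropWhile_sublist _).subset (by rw [hdw]; simp))
          omega
        rw [hdw] at hu_sorted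
        intro y hy
        rcases List.mem_cons.mp hy with rfl | hyw
        · exact hxh
        · have : h ≤ y := (List.pairwise_cons.mp hu_sorted).1 y hyw
          omega
  · exact List.Pairwise.sublist (List.dropWhile_sublist _) hrest

-- the main induction: on a ≤-sorted list t whose elements all exceed prev,
-- A's run-histogram loop at pos = i+1 agrees with B's index loop at index i,
-- and sorted(set(t)) has t's head
theorem main_lemma (n : Nat) : ∀ (t : List Int), t.length ≤ n →
    t.Pairwise (· ≤ ·) →
    (∀ (prev : Option Int) (i : Int), (∀ y ∈ t, ∀ p, prev = some p → p < y) →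
      isFrLoopA ((PySem.List.sorted (PySem.Set.ofList t) (fun x => x) false).map
          (fun r => (r, (PySem.List.count t r : Int)))) (i + 1) = isFrLoopB t prev i)
    ∧ (PySem.List.sorted (PySem.Set.ofList t) (fun x => x) false).head? = t.head? := by
  induction n with
  | zero =>
      intro t ht _
      have : t = [] := List.eq_nil_of_length_eq_zero (Nat.le_zero.mp ht)
      subst this
      exact ⟨fun prev i _ => by simp [PySem.Set.ofList, PySem.List.sorted, isFrLoopA, isFrLoopB],
        by simp [PySem.Set.ofList, PySem.List.sorted]⟩
  | succ n ih =>
      intro t ht hsorted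
      match t with
      | [] =>
          exact ⟨fun prev i _ => by simp [PySem.Set.ofList, PySem.List.sorted, isFrLoopA, isFrLoopB],
            by simp [PySem.Set.ofList, PySem.List.sorted]⟩
      | x :: rest =>
          obtain ⟨m, u, hsplit, hugt, hu_sorted⟩ := sorted_cons_decomp x rest hsorted
          have hxnotu : x ∉ u := fun h => lt_irrefl x (hugt x h)
          have hkey : PySem.List.sorted (PySem.Set.ofList (x :: rest)) (fun y => y) false
              = x :: PySem.List.sorted (PySem.Set.ofList u) (fun y => y) false := by
            apply PySem.List.sorted_eq_of_perm_of_pairwise_lt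
            · rw [List.perm_ext_iff_of_nodup ?_ (ofList_nodup _)]
              · intro a
                simp only [List.mem_cons, PySem.List.mem_sorted, mem_ofList]
                constructor
                · rintro (rfl | ha)
                  · exact Or.inl rfl
                  · exact Or.inr (by rw [← hsplit]; exact List.mem_append_right _ ha)
                · rintro (rfl | ha)
                  · exact Or.inl rfl
                  · rw [← hsplit] at ha
                    rcases List.mem_append.mp ha with h1 | h2
                    · exact Or.inl (List.eq_of_mem_replicate h1)
                    · exact Or.inr h2
              · rw [List.nodup_cons]
                refine ⟨?_, ?_⟩
                · intro hmem
                  exact hxnotu ((mem_ofList u x).mp ((PySem.List.mem_sorted _ _ _ _).mp hmem))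
                · exact ((PySem.List.sorted_perm _ _ _).nodup_iff).mpr (ofList_nodup u)
            · rw [List.pairwise_cons]
              refine ⟨?_, PySem.List.sorted_ofList_pairwise_lt u⟩
              intro y hy
              exact hugt y ((mem_ofList u y).mp ((PySem.List.mem_sorted _ _ _ _).mp hy))
          have hcx : (PySem.List.count (x :: rest) x : Int) = (m : Int) + 1 := by
            rw [PySem.List.count_eq, ← hsplit]
            simp [List.count_cons_self, List.count_append,
              List.count_eq_zero.mpr hxnotu]
          have hcr : ∀ r ∈ u, PySem.List.count (x :: rest) r = PySem.List.count u r := by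
            intro r hr
            have hrx : r ≠ x := fun h => absurd (hugt r hr) (by rw [h]; exact lt_irrefl x)
            rw [PySem.List.count_eq, PySem.List.count_eq, ← hsplit]
            simp [List.count_cons, List.count_append, List.count_replicate,
              (by simpa using hrx.symm : ¬ (x == r) = true)]
          have hulen : u.length ≤ n := by
            have h1 : (List.replicate m x ++ u).length = rest.length := by rw [hsplit]
            have h2 : rest.length ≤ n := by simpa using Nat.succ_le_succ_iff.mp ht
            simp at h1
            omega
          obtain ⟨ihloop, _⟩ := ih u hulen hu_sorted
          refine ⟨?_, by rw [hkey]; rfl⟩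
          intro prev i hprev
          rw [hkey]
          simp only [List.map_cons, isFrLoopA]
          have hnoskip : (prev == some x) = false := by
            cases prev with
            | none => rfl
            | some p =>
                have hpx := hprev x (List.mem_cons_self) p rfl
                simp only [beq_eq_false_iff_ne, ne_eq, Option.some.injEq]
                omega
          rw [show isFrLoopB (x :: rest) prev i
              = (if x ≠ i + 1 then false else isFrLoopB rest (some x) (i + 1)) by
            simp only [isFrLoopB, hnoskip]; rfl]
          by_cases hx : x = i + 1
          · rw [if_neg (by omega), if_neg (by simp [hx])]
            rw [List.map_congr_left (fun r hr => by
              rw [hcr r ((mem_ofList u r).mp ((PySem.List.mem_sorted _ _ _ _).mp hr))])]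
            rw [hcx, ← hsplit, isFrLoopB_replicate]
            have hih := ihloop (some x) (i + 1 + m)
              (fun y hy p hp => by cases hp; exact hugt y hy)
            rw [show (i + 1) + ((m : Int) + 1) = (i + 1 + (m : Int)) + 1 by ring]
            exact hih
          · rw [if_pos (by omega), if_pos (by omega)]

-- sorted(set(fr)) = sorted(set(sorted(fr)))
theorem ranks_eq (fr : List Int) :
    PySem.List.sorted (PySem.Set.ofList fr) (fun x => x) false
      = PySem.List.sorted (PySem.Set.ofList (PySem.List.sorted fr (fun x => x) false)) (fun x => x) false := by
  apply Eq.symm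
  apply PySem.List.sorted_eq_of_perm_of_pairwise_lt
  · refine (PySem.List.sorted_perm _ _ _).trans ?_
    rw [List.perm_ext_iff_of_nodup (ofList_nodup _) (ofList_nodup _)]
    intro a
    rw [mem_ofList, mem_ofList, PySem.List.mem_sorted]
  · exact PySem.List.sorted_ofList_pairwise_lt fr

theorem zip_map_self {α β : Type} (l : List α) (f : α → β) :
    l.zip (l.map f) = l.map (fun x => (x, f x)) := by
  induction l with
  | nil => rfl
  | cons h t ih => simp [ih]

-- ===== VERDICT (by name: the statement is the Claim_ definition above) =====
theorem is_fr_spec : Claim_equal_is_fr := by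
  unfold Claim_equal_is_fr Spec_is_fr
  intro fr _ hpre
  unfold is_fr is_fr_alt
  simp only []
  have hsne : PySem.List.sorted fr (fun x => x) false ≠ [] := by
    intro h
    have := PySem.List.sorted_perm fr (fun x => x) false
    rw [h] at this
    exact hpre (this.symm.eq_nil)
  cases hs : PySem.List.sorted fr (fun x => x) false with
  | nil => exact absurd hs hsne
  | cons x rest =>
      obtain ⟨hloop, hhead⟩ := main_lemma (x :: rest).length (x :: rest) le_rfl
        (by rw [← hs]; exact PySem.List.sorted_pairwise fr (fun x => x))
      have hre := ranks_eq fr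
      rw [hs] at hre
      rw [← hre] at hloop hhead
      obtain ⟨rs, hrs⟩ := List.head?_eq_some_iff.mp (by rw [hhead]; rfl)
      rw [hrs, zip_map_self, PySem.List.pyGetD_zero_cons, PySem.List.pyGetD_zero_cons]
      have hcnt : (fun i => (i, (PySem.List.count fr i : Int)))
          = (fun r => (r, (PySem.List.count (x :: rest) r : Int))) := by
        funext r
        rw [PySem.List.count_eq, PySem.List.count_eq,
          ((PySem.List.sorted_perm fr (fun x => x) false).count_eq r).symm, hs]
      by_cases hx1 : x = 1
      · rw [if_neg (by omega), if_neg (by omega)]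
        have := hloop none 0 (by intro y _ p hp; cases hp)
        rw [hrs] at this
        rw [hcnt]
        simpa using this
      · rw [if_pos (by omega), if_pos (by omega)]
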